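-- pv_equiv track=rewrite | github.com/Invisiphantom/Python-Table | packages/MyRNNdata.py | preprocess_nmt
-- ===== SOURCE A (Python) =====
-- def preprocess_nmt(text: str):
--     def no_space(char, prev_char):
--         return char in set(",.!?") and prev_char != " "
--
--     text = text.replace("\u202f", " ").replace("\xa0", " ").lower()
--     out = [
--         " " + char if i > 0 and no_space(char, text[i - 1]) else char
--         for i, char in enumerate(text)
--     ]
--     return "".join(out)
-- ===== SOURCE B (Python) =====
-- def preprocess_nmt(text: str):
--     # Split on spaces, give every intra-word punctuation mark a leading space
--     # (inside a word the previous character can never be ' '), rejoin with ' '.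
--     text = text.replace("\u202f", " ").replace("\xa0", " ").lower()
--     def fix(word):
--         return word[:1] + "".join(" " + c if c in ",.!?" else c for c in word[1:])
--     return " ".join(fix(w) for w in text.split(" "))
-- ===== Notes on version B (the rewrite author's own statement) =====
-- stated objective: alternative
-- what changed: Replaces A's per-character scan that inspects the previous character (enumerate + text[i-1] + inner no_space helper) by a split/join algorithm: split the normalized text on spaces, prefix every punctuation mark that is not a word's first character with a space unconditionally (inside a word the previous character can never be a space), and rejoin with spaces; the previous-character test disappears entirely.
import Mathlib
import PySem

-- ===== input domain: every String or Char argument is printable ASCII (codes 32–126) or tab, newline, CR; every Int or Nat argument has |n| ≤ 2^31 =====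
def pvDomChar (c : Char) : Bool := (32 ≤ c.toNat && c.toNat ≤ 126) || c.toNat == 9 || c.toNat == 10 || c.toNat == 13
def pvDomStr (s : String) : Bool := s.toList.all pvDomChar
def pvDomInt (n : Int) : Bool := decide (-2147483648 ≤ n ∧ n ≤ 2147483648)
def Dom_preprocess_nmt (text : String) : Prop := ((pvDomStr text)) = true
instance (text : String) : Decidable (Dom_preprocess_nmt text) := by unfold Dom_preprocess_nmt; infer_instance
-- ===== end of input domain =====

-- B replaces A's previous-character scan by a split/join algorithm: split on ' ',
-- give every intra-word punctuation mark a leading space unconditionally, rejoin;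
-- same return value on every input, no side effects.

-- ===== PORT A =====
-- A's inner helper `no_space(char, prev_char)`
def pvNoSpace (char : Char) (prev_char : Char) : Bool :=
  PySem.Set.contains (PySem.Set.ofList ",.!?".toList) char && prev_char != ' '

def preprocess_nmt (text : String) : String :=
  let text := PySem.Str.lower
    (PySem.Str.replace (PySem.Str.replace text "\u202F" " ") "\u00A0" " ")
  let out : List String :=
    (PySem.List.enumerate text.toList).map (fun ic =>
      if 0 < ic.1 && pvNoSpace ic.2 (PySem.List.pyGetD text.toList (ic.1 - 1) ' ')
      then String.ofList [' ', ic.2] else String.ofList [ic.2])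
  PySem.Str.join "" out

-- ===== PORT B =====
-- B's inner helper `fix(word)` = word[:1] + "".join(" " + c if c in ",.!?" else c for c in word[1:])
def pvFix (w : List Char) : List Char :=
  PySem.List.slice w none (some 1) ++
  PySem.Chars.join [] ((PySem.List.slice w (some 1) none).map
    (fun c => if PySem.Chars.isIn [c] ",.!?".toList then [' ', c] else [c]))

def preprocess_nmt_alt (text : String) : String :=
  let text := PySem.Str.lower
    (PySem.Str.replace (PySem.Str.replace text "\u202F" " ") "\u00A0" " ")
  -- " ".join(fix(w) for w in text.split(" "))
  String.ofList (PySem.Chars.join [' ']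
    ((PySem.Chars.splitOn text.toList [' ']).map pvFix))

-- ===== PRECONDITION & SPEC =====
def Spec_preprocess_nmt (text : String) (out : String) : Prop := out = preprocess_nmt_alt text
instance (text : String) (out : String) : Decidable (Spec_preprocess_nmt text out) := by unfold Spec_preprocess_nmt; infer_instance

-- ===== CLAIM (what is proved, stated in full; the proofs are below) =====
def Claim_equal_preprocess_nmt : Prop := ∀ (text : String), Dom_preprocess_nmt text → Spec_preprocess_nmt text (preprocess_nmt text)

-- ===== LEMMAS AND PROOFS =====

-- proof-side model of Python's split(" ")
def pvSplit : List Char → List (List Char)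
  | [] => [[]]
  | c :: r => if c = ' ' then [] :: pvSplit r else (pvSplit r).modifyHead (c :: ·)

-- proof-side per-character piece of B's fix
def pvIns (c : Char) : List Char :=
  if PySem.Chars.isIn [c] ",.!?".toList then [' ', c] else [c]

lemma pvSplit_ne_nil (t : List Char) : pvSplit t ≠ [] := by
  cases t with
  | nil => simp [pvSplit]
  | cons c r =>
      by_cases h : c = ' ' <;>
        simp [pvSplit, h, List.modifyHead_eq_nil_iff, pvSplit_ne_nil r]

lemma pv_modifyHead_id {T : Type} (l : List T) : List.modifyHead (fun x => x) l = l := by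
  cases l <;> simp

lemma pv_go_spec : ∀ (fuel : Nat) (l cur : List Char) (acc : List (List Char)),
    l.length ≤ fuel →
    PySem.Chars.splitOn.go [' '] fuel l cur acc
      = acc.reverse ++ (pvSplit l).modifyHead (cur.reverse ++ ·)
  | fuel, [], cur, acc, _ => by
      cases fuel <;> simp [PySem.Chars.splitOn.go, pvSplit]
  | Nat.succ fuel, c :: rest, cur, acc, h => by
      by_cases hc : c = ' '
      · subst hc
        rw [show PySem.Chars.splitOn.go [' '] (fuel+1) (' '::rest) cur acc
              = PySem.Chars.splitOn.go [' '] fuel rest [] (cur.reverse :: acc) from by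
            simp [PySem.Chars.splitOn.go, List.isPrefixOf]]
        rw [pv_go_spec fuel rest [] (cur.reverse :: acc) (by simpa using Nat.lt_succ_iff.mp (by simpa using h))]
        simp [pvSplit, pv_modifyHead_id]
      · rw [show PySem.Chars.splitOn.go [' '] (fuel+1) (c::rest) cur acc
              = PySem.Chars.splitOn.go [' '] fuel rest (c :: cur) acc from by
            simp [PySem.Chars.splitOn.go, List.isPrefixOf, Ne.symm hc]]
        rw [pv_go_spec fuel rest (c :: cur) acc (by simpa using Nat.lt_succ_iff.mp (by simpa using h))]
        obtain ⟨w, ws, hw⟩ : ∃ w ws, pvSplit rest = w :: ws := by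
          cases hsplit : pvSplit rest with
          | nil => exact absurd hsplit (pvSplit_ne_nil rest)
          | cons w ws => exact ⟨w, ws, rfl⟩
        simp [pvSplit, hc, hw]

lemma pv_splitOn_eq (l : List Char) :
    PySem.Chars.splitOn l [' '] = pvSplit l := by
  have := pv_go_spec (l.length + 1) l [] [] (Nat.le_succ _)
  simpa [PySem.Chars.splitOn, pv_modifyHead_id] using this

lemma pv_join_nil_flatten (parts : List (List Char)) :
    PySem.Chars.join [] parts = parts.flatten := by
  show List.intercalate [] parts = parts.flatten
  induction parts with
  | nil => rfl
  | cons p ps ih =>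
      cases ps with
      | nil => simp [List.intercalate]
      | cons q qs => simp_all [List.intercalate, List.intersperse]

-- the pairwise condition of A, as a function of (previous char, char)
def pvF (pc : Char × Char) : List Char :=
  if PySem.Chars.isIn [pc.2] ",.!?".toList && pc.1 != ' ' then [' ', pc.2] else [pc.2]

lemma pvF_space (x : Char) : pvF (x, ' ') = [' '] := by
  have h : PySem.Chars.isIn [' '] [',', '.', '!', '?'] = false := by decide
  simp [pvF, h]

lemma pvF_of_ne (prev c : Char) (h : prev ≠ ' ') : pvF (prev, c) = pvIns c := by
  simp [pvF, pvIns, h]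

lemma pv_join_append_head (a b : List Char) (rest : List (List Char)) :
    PySem.Chars.join [' '] ((a ++ b) :: rest) = a ++ PySem.Chars.join [' '] (b :: rest) := by
  cases rest with
  | nil => simp [PySem.Chars.join_singleton]
  | cons q qs => simp [PySem.Chars.join_cons_cons]

lemma pv_fix_nil : pvFix [] = [] := by decide

lemma pv_fix_cons (c : Char) (w : List Char) :
    pvFix (c :: w) = c :: w.flatMap pvIns := by
  rw [pvFix, PySem.List.slice_to _ (by norm_num : (0:Int) ≤ 1),
    PySem.List.slice_from _ (by norm_num : (0:Int) ≤ 1), pv_join_nil_flatten]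
  rfl

-- the core correspondence: A's indexed pass over a suffix equals the pairwise pass,
-- where `pre` is the already-consumed prefix (its last char is the predecessor)
lemma pv_key (suf pre : List Char) :
    ((PySem.List.enumerate suf (pre.length : Int)).map (fun ic =>
        if 0 < ic.1 && pvNoSpace ic.2 (PySem.List.pyGetD (pre ++ suf) (ic.1 - 1) ' ')
        then [' ', ic.2] else [ic.2])).flatten
      = ((pre.getLastD ' ' :: suf).zip suf).flatMap pvF := by
  induction suf generalizing pre with
  | nil => simp [PySem.List.enumerate_nil]
  | cons c rest ih =>
      rw [PySem.List.enumerate_cons]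
      have hpre : pre ++ c :: rest = (pre ++ [c]) ++ rest := by simp
      have hlen : (pre.length : Int) + 1 = ((pre ++ [c]).length : Int) := by
        simp
      rw [List.map_cons, List.flatten_cons, hpre, hlen, ih (pre ++ [c])]
      have hlast : (pre ++ [c]).getLastD ' ' = c := by simp
      rw [hlast]
      simp only [List.zip_cons_cons, List.flatMap_cons]
      congr 1
      cases pre with
      | nil =>
          simp [pvNoSpace, pvF]
      | cons p ps =>
          have h0 : (0 : Int) < ((p :: ps).length : Int) := by
            simp
          have hidx : ((p :: ps).length : Int) - 1 = (((p :: ps).length - 1 : Nat) : Int) := by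
            simp
          rw [hidx, PySem.List.pyGetD_natCast]
          have hget : ((p :: ps) ++ [c] ++ rest).getD ((p :: ps).length - 1) ' '
              = (p :: ps).getLastD ' ' := by
            have hlt : (p :: ps).length - 1 < (p :: ps).length := by simp
            rw [List.getD_eq_getElem?_getD]
            rw [List.append_assoc, List.getElem?_append_left hlt]
            rw [List.getLastD_eq_getLast?, List.getLast?_eq_getElem?]
          rw [hget]
          simp [pvNoSpace, pvF, PySem.Chars.isIn_iff_infix, List.singleton_infix_iff]

-- the pairwise pass equals B's split/fix/join form (both claims proved together)
lemma pv_split_pass : ∀ t : List Char,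
    (((' ' :: t).zip t).flatMap pvF
        = PySem.Chars.join [' '] ((pvSplit t).map pvFix)) ∧
    (∀ prev, prev ≠ ' ' →
      ((prev :: t).zip t).flatMap pvF
        = PySem.Chars.join [' ']
            ((((pvSplit t).headD []).flatMap pvIns) :: ((pvSplit t).tail).map pvFix)) := by
  intro t
  induction t with
  | nil => simp [pvSplit, PySem.Chars.join_singleton, pv_fix_nil]
  | cons c r ih =>
      obtain ⟨w, ws, hw⟩ : ∃ w ws, pvSplit r = w :: ws := by
        cases hsplit : pvSplit r with
        | nil => exact absurd hsplit (pvSplit_ne_nil r)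
        | cons w ws => exact ⟨w, ws, rfl⟩
      by_cases hc : c = ' '
      · subst hc
        constructor
        · rw [List.zip_cons_cons, List.flatMap_cons, pvF_space, ih.1]
          simp [pvSplit, hw, pv_fix_nil, PySem.Chars.join_cons_cons]
        · intro prev hprev
          rw [List.zip_cons_cons, List.flatMap_cons, pvF_space, ih.1]
          simp [pvSplit, hw, PySem.Chars.join_cons_cons]
      · have h1 : ((c :: r).zip r).flatMap pvF
            = PySem.Chars.join [' '] (w.flatMap pvIns :: ws.map pvFix) := by
          rw [ih.2 c hc]
          simp [hw]
        constructor
        · rw [List.zip_cons_cons, List.flatMap_cons,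
            show pvF (' ', c) = [c] from by simp [pvF], h1]
          simp only [pvSplit, hc, if_false, hw, List.modifyHead_cons, List.map_cons,
            pv_fix_cons]
          rw [show (c :: w.flatMap pvIns) = [c] ++ w.flatMap pvIns from rfl,
            pv_join_append_head]
        · intro prev hprev
          rw [List.zip_cons_cons, List.flatMap_cons, pvF_of_ne prev c hprev, h1]
          simp only [pvSplit, hc, if_false, hw, List.modifyHead_cons, List.headD_cons,
            List.tail_cons, List.flatMap_cons]
          exact (pv_join_append_head _ _ _).symm

-- ===== VERDICT (by name: the statement is the Claim_ definition above) =====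
theorem preprocess_nmt_spec : Claim_equal_preprocess_nmt := by
  intro text _
  unfold Spec_preprocess_nmt preprocess_nmt preprocess_nmt_alt
  apply String.toList_inj.mp
  simp only [PySem.Str.toList_join, String.toList_ofList, List.map_map]
  rw [show ("" : String).toList = [] from rfl, pv_join_nil_flatten, pv_splitOn_eq,
    ← (pv_split_pass _).1]
  have := pv_key (PySem.Str.lower
      (PySem.Str.replace (PySem.Str.replace text "\u202F" " ") "\u00A0" " ")).toList []
  simpa [Function.comp_def, List.flatMap_def, apply_ite String.toList] using this
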